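-- pv_equiv track=rewrite | github.com/EHoffm/CPPS_Circular_factory_usecases_JMS | src/streamlit_interface.py | compute_module_positions
-- ===== SOURCE A (Python) =====
-- from typing import Dict, List, Tuple, Optional, Any
--
-- DIRECTIONS_COORDS = [(0, 1), (1, 0), (0, -1), (-1, 0)]  # north, east, south, west
--
-- def compute_module_positions(
--     adjacency_matrix: Dict[str, List[str]],
-- ) -> Dict[str, Tuple[int, int]]:
--     """
--     Compute 2D positions for modules using BFS to create a grid layout.
--
--     Args:
--         adjacency_matrix: Dictionary mapping modules to their connections in [N, E, S, W] order
--
--     Returns: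
--         Dictionary mapping module IRIs to (x, y) coordinates
--     """
--     positions = {}
--     modules = list(adjacency_matrix.keys())
--     if not modules:
--         return positions
--
--     # Start with first module at origin
--     queue = [modules[0]]
--     positions[modules[0]] = (0, 0)
--     visited = {modules[0]}
--
--     while queue:
--         current_module = queue.pop(0)
--         if current_module not in adjacency_matrix:
--             continue
--
--         x, y = positions[current_module]
--         connections = adjacency_matrix[current_module]
--
--         for i, target_module in enumerate(connections):
--             if target_module and target_module not in positions:
--                 dx, dy = DIRECTIONS_COORDS[i]
--                 positions[target_module] = (x + dx, y + dy)
--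
--                 if target_module in adjacency_matrix and target_module not in visited:
--                     queue.append(target_module)
--                     visited.add(target_module)
--
--     return positions
-- ===== SOURCE B (Python) =====
-- DIRECTIONS_COORDS = [(0, 1), (1, 0), (0, -1), (-1, 0)]  # north, east, south, west
--
-- def compute_module_positions(adjacency_matrix):
--     """Two-phase layout: first compute the spanning placement edges by pure
--     reachability (no coordinates), then assign coordinates in a second pass."""
--     if not adjacency_matrix:
--         return {}
--     start = next(iter(adjacency_matrix))
--     positions = {start: (0, 0)}
--     for parent, i, child in _placement_edges(adjacency_matrix, start):
--         px, py = positions[parent]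
--         dx, dy = DIRECTIONS_COORDS[i]
--         positions[child] = (px + dx, py + dy)
--     return positions
--
-- def _placement_edges(adj, start):
--     """Placement edges (parent, direction_index, child) in discovery order,
--     using only set membership: an order array with a read index, no queue pops."""
--     placed = {start}
--     enqueued = {start}
--     order = [start]
--     edges = []
--     i = 0
--     while i < len(order):
--         current = order[i]
--         i += 1
--         for j, target in enumerate(adj.get(current, [])):
--             if target and target not in placed:
--                 edges.append((current, j, target))
--                 placed.add(target)
--                 if target in adj and target not in enqueued:
--                     order.append(target)
--                     enqueued.add(target)
--     return edges
-- ===== Notes on version B (the rewrite author's own statement) =====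
-- stated objective: alternative
-- what changed: B separates traversal from geometry: a first pass computes the spanning placement edge list (parent, direction index, child) from pure set-membership reachability over an append-only order array with a read index (no coordinates, no pop(0)), and a second pass folds coordinates over those edges; A interleaves coordinate assignment with a single pop(0) BFS queue.
-- outside the precondition, e.g. on compute_module_positions({'a': ['', '', '', '', 'b']}): A raises IndexError, B raises IndexError; on compute_module_positions({'a': ['', '', '', '', '']}): A returns {'a': (0, 0)}, B returns {'a': (0, 0)}
import Mathlib
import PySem

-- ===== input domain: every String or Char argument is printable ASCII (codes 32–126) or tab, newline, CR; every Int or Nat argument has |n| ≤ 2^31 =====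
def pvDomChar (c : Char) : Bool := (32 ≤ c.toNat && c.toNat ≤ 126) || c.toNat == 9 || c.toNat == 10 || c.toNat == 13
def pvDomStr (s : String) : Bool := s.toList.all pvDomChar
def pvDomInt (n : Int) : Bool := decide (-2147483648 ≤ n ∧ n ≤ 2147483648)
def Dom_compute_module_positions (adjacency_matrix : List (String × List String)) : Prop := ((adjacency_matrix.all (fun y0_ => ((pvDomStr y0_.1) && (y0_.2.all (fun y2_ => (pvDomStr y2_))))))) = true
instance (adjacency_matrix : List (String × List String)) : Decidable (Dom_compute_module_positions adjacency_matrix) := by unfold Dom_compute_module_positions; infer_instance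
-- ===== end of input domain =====

-- B separates traversal from geometry: a first pass computes the spanning placement edge list by
-- set-membership reachability (index-pointer over an append-only order array, no coordinates),
-- a second pass folds coordinates over those edges; same values as A's interleaved pop(0) BFS.

-- ===== PORT A =====
-- DIRECTIONS_COORDS (module constant shared by both sources)
def pvDirs : List (Int × Int) := [(0, 1), (1, 0), (0, -1), (-1, 0)]

-- body of A's inner 'for i, target_module in enumerate(connections)' loop
def pvInnerA (adj : PySem.Dict String (List String)) (xy : Int × Int)
    (st : PySem.Dict String (Int × Int) × PySem.Set String × List String)
    (it : Int × String) :
    PySem.Dict String (Int × Int) × PySem.Set String × List String :=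
  if it.2 ≠ "" ∧ st.1.get? it.2 = none then
    match PySem.List.pyGet? pvDirs it.1 with  -- DIRECTIONS_COORDS[i]; none = IndexError, excluded by Pre_
    | none => st
    | some dxy =>
      let pos' := st.1.insert it.2 (xy.1 + dxy.1, xy.2 + dxy.2)
      if adj.contains it.2 ∧ ¬ PySem.Set.contains st.2.1 it.2 then
        (pos', PySem.Set.add st.2.1 it.2, st.2.2 ++ [it.2])
      else
        (pos', st.2.1, st.2.2)
  else st

-- one iteration of A's while loop for module c: returns (positions, visited, list appended to queue)
def pvNodeA (adj : PySem.Dict String (List String)) (c : String)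
    (pos : PySem.Dict String (Int × Int)) (vis : PySem.Set String) :
    PySem.Dict String (Int × Int) × PySem.Set String × List String :=
  match adj.get? c with
  | none => (pos, vis, [])            -- 'continue'
  | some conns =>
    (PySem.List.enumerate conns).foldl
      (pvInnerA adj ((pos.get? c).getD (0, 0))) (pos, vis, [])

-- A's while loop; fuel is a totality guard only (one unit per popped module; never exhausted)
def pvLoopA (adj : PySem.Dict String (List String)) :
    Nat → List String → PySem.Dict String (Int × Int) → PySem.Set String →
    PySem.Dict String (Int × Int)
  | _, [], pos, _ => pos
  | 0, _ :: _, pos, _ => pos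
  | f + 1, c :: q, pos, vis =>
    let r := pvNodeA adj c pos vis
    pvLoopA adj f (q ++ r.2.2) r.1 r.2.1

def compute_module_positions (adjacency_matrix : List (String × List String)) : List (String × Int × Int) :=
  let adj := PySem.Dict.ofList adjacency_matrix
  match adj.keys with
  | [] => []
  | m0 :: _ =>
    (pvLoopA adj (adjacency_matrix.length + 1) [m0]
      (PySem.Dict.insert PySem.Dict.empty m0 ((0 : Int), (0 : Int)))
      (PySem.Set.add PySem.Set.empty m0)).items

-- ===== PORT B =====
-- body of _placement_edges' inner 'for j, target in enumerate(adj.get(current, []))' loop;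
-- state = (placed, enqueued, order, edges)
def pvStepB (adj : PySem.Dict String (List String)) (current : String)
    (st : PySem.Set String × PySem.Set String × List String × List (String × Int × String))
    (it : Int × String) :
    PySem.Set String × PySem.Set String × List String × List (String × Int × String) :=
  if it.2 ≠ "" ∧ ¬ PySem.Set.contains st.1 it.2 then
    let edges' := st.2.2.2 ++ [(current, it.1, it.2)]
    let placed' := PySem.Set.add st.1 it.2
    if adj.contains it.2 ∧ ¬ PySem.Set.contains st.2.1 it.2 then
      (placed', PySem.Set.add st.2.1 it.2, st.2.2.1 ++ [it.2], edges')
    else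
      (placed', st.2.1, st.2.2.1, edges')
  else st

-- _placement_edges' while loop: read index i over the growing order array;
-- fuel is a totality guard only (one unit per processed index; never exhausted)
def pvDiscover (adj : PySem.Dict String (List String)) :
    Nat → List String → Nat → PySem.Set String → PySem.Set String →
    List (String × Int × String) → List (String × Int × String)
  | 0, _, _, _, _, edges => edges
  | f + 1, order, i, placed, enq, edges =>
    match order[i]? with
    | none => edges                   -- i >= len(order): loop ends
    | some current =>
      let r := (PySem.List.enumerate (adj.getD current [])).foldl (pvStepB adj current)
                 (placed, enq, order, edges)
      pvDiscover adj f r.2.2.1 (i + 1) r.1 r.2.1 r.2.2.2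

-- body of B's second pass: positions[child] = positions[parent] + DIRECTIONS_COORDS[i]
def pvPlace (pos : PySem.Dict String (Int × Int)) (e : String × Int × String) :
    PySem.Dict String (Int × Int) :=
  let pxy := (pos.get? e.1).getD (0, 0)
  match PySem.List.pyGet? pvDirs e.2.1 with  -- DIRECTIONS_COORDS[i]; none = IndexError, excluded by Pre_
  | none => pos
  | some d => pos.insert e.2.2 (pxy.1 + d.1, pxy.2 + d.2)

def compute_module_positions_alt (adjacency_matrix : List (String × List String)) : List (String × Int × Int) :=
  let adj := PySem.Dict.ofList adjacency_matrix
  match adj.keys with                 -- 'if not adjacency_matrix: return {}'; start = next(iter(...))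
  | [] => []
  | m0 :: _ =>
    let edges := pvDiscover adj (adjacency_matrix.length + 1) [m0] 0
        (PySem.Set.add PySem.Set.empty m0) (PySem.Set.add PySem.Set.empty m0) []
    (edges.foldl pvPlace (PySem.Dict.insert PySem.Dict.empty m0 ((0 : Int), (0 : Int)))).items

-- ===== PRECONDITION & SPEC =====
-- Pre_ excludes connection lists longer than 4: there A indexes DIRECTIONS_COORDS out of range and
-- raises IndexError whenever a non-empty, not-yet-placed target sits at index >= 4 (B raises the same
-- way in its second pass); in the corner cases where A still returns (every extra entry empty or
-- already placed) B ignores the extras and agrees.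
def Pre_compute_module_positions (adjacency_matrix : List (String × List String)) : Prop :=
  ∀ p ∈ adjacency_matrix, p.2.length ≤ 4
instance (adjacency_matrix : List (String × List String)) : Decidable (Pre_compute_module_positions adjacency_matrix) := by unfold Pre_compute_module_positions; infer_instance

def pvWitness_compute_module_positions : (List (String × List String)) :=
  [("a", ["b", "", "", "c"]), ("b", ["a"]), ("c", [])]

def Spec_compute_module_positions (adjacency_matrix : List (String × List String)) (out : List (String × Int × Int)) : Prop := out = compute_module_positions_alt adjacency_matrix
instance (adjacency_matrix : List (String × List String)) (out : List (String × Int × Int)) : Decidable (Spec_compute_module_positions adjacency_matrix out) := by unfold Spec_compute_module_positions; infer_instance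

-- ===== CLAIM (what is proved, stated in full; the proofs are below) =====
def Claim_equal_compute_module_positions : Prop := ∀ (adjacency_matrix : List (String × List String)), Dom_compute_module_positions adjacency_matrix → Pre_compute_module_positions adjacency_matrix → Spec_compute_module_positions adjacency_matrix (compute_module_positions adjacency_matrix)

-- ===== LEMMAS AND PROOFS =====

-- membership in a Set after add, as Bool equations
theorem pvContains_add_self (s : PySem.Set String) (x : String) :
    PySem.Set.contains (PySem.Set.add s x) x = true := by
  rw [PySem.Set.contains_iff, PySem.Set.mem_add]; right; rfl

theorem pvContains_add_of_ne (s : PySem.Set String) (x u : String) (h : u ≠ x) :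
    PySem.Set.contains (PySem.Set.add s x) u = PySem.Set.contains s u := by
  by_cases hu : u ∈ s
  · rw [(PySem.Set.contains_iff _ _).mpr (by rw [PySem.Set.mem_add]; exact Or.inl hu),
        (PySem.Set.contains_iff _ _).mpr hu]
  · have h1 : ¬ u ∈ PySem.Set.add s x := by rw [PySem.Set.mem_add]; rintro (h' | h') <;> [exact hu h'; exact h h']
    rw [Bool.eq_iff_iff]; simp [h1, hu]

theorem pvContains_add_mono (s : PySem.Set String) (x u : String)
    (h : PySem.Set.contains s u = true) :
    PySem.Set.contains (PySem.Set.add s x) u = true := by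
  by_cases hu : u = x
  · subst hu; exact pvContains_add_self _ _
  · rw [pvContains_add_of_ne s x u hu]; exact h

-- B's inner fold: the order and edges components are pure accumulators
theorem pvStepB_acc (adj : PySem.Dict String (List String)) (c : String) :
    ∀ (l : List (Int × String)) (placed enq : PySem.Set String) (ord : List String)
      (eds : List (String × Int × String)),
      l.foldl (pvStepB adj c) (placed, enq, ord, eds)
        = ((l.foldl (pvStepB adj c) (placed, enq, [], [])).1,
           (l.foldl (pvStepB adj c) (placed, enq, [], [])).2.1,
           ord ++ (l.foldl (pvStepB adj c) (placed, enq, [], [])).2.2.1,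
           eds ++ (l.foldl (pvStepB adj c) (placed, enq, [], [])).2.2.2) := by
  intro l
  induction l with
  | nil => intro placed enq ord eds; simp
  | cons x l ih =>
    intro placed enq ord eds
    simp only [List.foldl_cons]
    by_cases h1 : x.2 ≠ "" ∧ ¬ PySem.Set.contains placed x.2
    · by_cases h2 : adj.contains x.2 ∧ ¬ PySem.Set.contains enq x.2
      · simp only [pvStepB, if_pos h1, if_pos h2]
        rw [ih (PySem.Set.add placed x.2) (PySem.Set.add enq x.2) (ord ++ [x.2]) (eds ++ [(c, x.1, x.2)]),
            ih (PySem.Set.add placed x.2) (PySem.Set.add enq x.2) ([] ++ [x.2]) ([] ++ [(c, x.1, x.2)])]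
        simp
      · simp only [pvStepB, if_pos h1, if_neg h2]
        rw [ih (PySem.Set.add placed x.2) enq ord (eds ++ [(c, x.1, x.2)]),
            ih (PySem.Set.add placed x.2) enq [] ([] ++ [(c, x.1, x.2)])]
        simp
    · simp only [pvStepB, if_neg h1]
      exact ih placed enq ord eds

-- A's inner fold: the queue component is a pure accumulator
theorem pvInnerA_acc (adj : PySem.Dict String (List String)) (xy : Int × Int) :
    ∀ (l : List (Int × String)) (pos : PySem.Dict String (Int × Int))
      (vis : PySem.Set String) (q : List String),
      l.foldl (pvInnerA adj xy) (pos, vis, q)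
        = ((l.foldl (pvInnerA adj xy) (pos, vis, [])).1,
           (l.foldl (pvInnerA adj xy) (pos, vis, [])).2.1,
           q ++ (l.foldl (pvInnerA adj xy) (pos, vis, [])).2.2) := by
  intro l
  induction l with
  | nil => intro pos vis q; simp
  | cons x l ih =>
    intro pos vis q
    simp only [List.foldl_cons]
    by_cases h1 : x.2 ≠ "" ∧ pos.get? x.2 = none
    · cases hd : PySem.List.pyGet? pvDirs x.1 with
      | none => simp only [pvInnerA, if_pos h1, hd]; exact ih pos vis q
      | some dxy =>
        by_cases h2 : adj.contains x.2 ∧ ¬ PySem.Set.contains vis x.2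
        · simp only [pvInnerA, if_pos h1, hd, if_pos h2]
          rw [ih _ _ (q ++ [x.2]), ih _ _ ([] ++ [x.2])]
          simp
        · simp only [pvInnerA, if_pos h1, hd, if_neg h2]
          exact ih _ _ q
    · simp only [pvInnerA, if_neg h1]
      exact ih pos vis q

-- the discovery loop: edges is a pure accumulator
theorem pvDiscover_acc (adj : PySem.Dict String (List String)) :
    ∀ (fuel : Nat) (order : List String) (i : Nat) (placed enq : PySem.Set String)
      (eds : List (String × Int × String)),
      pvDiscover adj fuel order i placed enq eds
        = eds ++ pvDiscover adj fuel order i placed enq [] := by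
  intro fuel
  induction fuel with
  | zero => intro order i placed enq eds; simp [pvDiscover]
  | succ f ih =>
    intro order i placed enq eds
    simp only [pvDiscover]
    cases h : order[i]? with
    | none => simp
    | some cur =>
      simp only
      rw [pvStepB_acc adj cur _ placed enq order eds,
          pvStepB_acc adj cur _ placed enq order []]
      rw [ih, ih]
      simp
      conv_rhs => rw [ih]

-- placed only grows through B's inner fold
theorem pvStepB_placed_mono (adj : PySem.Dict String (List String)) (c : String) :
    ∀ (l : List (Int × String)) st (u : String),
      PySem.Set.contains st.1 u = true →
      PySem.Set.contains ((l.foldl (pvStepB adj c) st).1) u = true := by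
  intro l
  induction l with
  | nil => intro st u h; exact h
  | cons x l ih =>
    intro st u h
    simp only [List.foldl_cons]
    apply ih
    simp only [pvStepB]
    split_ifs with h1 h2
    · exact pvContains_add_mono _ _ _ h
    · exact pvContains_add_mono _ _ _ h
    · exact h

-- every member of the order accumulator is placed after B's inner fold
theorem pvStepB_order_placed (adj : PySem.Dict String (List String)) (c : String) :
    ∀ (l : List (Int × String)) st,
      (∀ u ∈ st.2.2.1, PySem.Set.contains st.1 u = true) →
      ∀ u ∈ (l.foldl (pvStepB adj c) st).2.2.1,
        PySem.Set.contains ((l.foldl (pvStepB adj c) st).1) u = true := by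
  intro l
  induction l with
  | nil => intro st h u hu; exact h u hu
  | cons x l ih =>
    intro st h
    simp only [List.foldl_cons]
    apply ih
    by_cases h1 : x.2 ≠ "" ∧ ¬ PySem.Set.contains st.1 x.2
    · by_cases h2 : adj.contains x.2 ∧ ¬ PySem.Set.contains st.2.1 x.2
      · simp only [pvStepB, if_pos h1, if_pos h2]
        intro u hu
        rcases List.mem_append.mp hu with hu | hu
        · exact pvContains_add_mono _ _ _ (h u hu)
        · simp only [List.mem_singleton] at hu
          subst hu
          exact pvContains_add_self _ _
      · simp only [pvStepB, if_pos h1, if_neg h2]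
        intro u hu
        exact pvContains_add_mono _ _ _ (h u hu)
    · simp only [pvStepB, if_neg h1]
      exact h

-- INNER SIMULATION: A's place-as-you-go connection loop versus B's record-the-edge loop
theorem pvInnerSim (adj : PySem.Dict String (List String)) (c : String) (xy : Int × Int) :
    ∀ (conns : List String) (j : Nat) (pos : PySem.Dict String (Int × Int))
      (placed enq : PySem.Set String),
      j + conns.length ≤ 4 →
      (∀ t, (pos.get? t).isSome = PySem.Set.contains placed t) →
      pos.get? c = some xy →
      (((PySem.List.enumerate conns (j : Int)).foldl (pvInnerA adj xy) (pos, enq, [])).1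
          = ((PySem.List.enumerate conns (j : Int)).foldl (pvStepB adj c)
              (placed, enq, ([] : List String), ([] : List (String × Int × String)))).2.2.2.foldl pvPlace pos)
      ∧ (((PySem.List.enumerate conns (j : Int)).foldl (pvInnerA adj xy) (pos, enq, [])).2.1
          = ((PySem.List.enumerate conns (j : Int)).foldl (pvStepB adj c) (placed, enq, [], [])).2.1)
      ∧ (((PySem.List.enumerate conns (j : Int)).foldl (pvInnerA adj xy) (pos, enq, [])).2.2
          = ((PySem.List.enumerate conns (j : Int)).foldl (pvStepB adj c) (placed, enq, [], [])).2.2.1)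
      ∧ (∀ t, ((((PySem.List.enumerate conns (j : Int)).foldl (pvInnerA adj xy) (pos, enq, [])).1).get? t).isSome
          = PySem.Set.contains (((PySem.List.enumerate conns (j : Int)).foldl (pvStepB adj c) (placed, enq, [], [])).1) t)
      ∧ ((((PySem.List.enumerate conns (j : Int)).foldl (pvInnerA adj xy) (pos, enq, [])).1).get? c = some xy) := by
  intro conns
  induction conns with
  | nil =>
    intro j pos placed enq hb hq hc
    simp only [PySem.List.enumerate_nil, List.foldl_nil]
    exact ⟨trivial, trivial, trivial, hq, hc⟩
  | cons t rest ih =>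
    intro j pos placed enq hb hq hc
    rw [PySem.List.enumerate_cons]
    have hcast : ((j : Int) + 1) = ((j + 1 : Nat) : Int) := by push_cast; ring
    rw [hcast]
    simp only [List.foldl_cons]
    have hb₁ : (j + 1) + rest.length ≤ 4 := by
      simp only [List.length_cons] at hb; omega
    by_cases h1 : t ≠ "" ∧ pos.get? t = none
    · -- target placed now
      have hbt : PySem.Set.contains placed t = false := by
        have h := hq t
        rw [h1.2] at h
        exact h.symm
      have h1b : t ≠ "" ∧ ¬ PySem.Set.contains placed t = true := ⟨h1.1, by rw [hbt]; simp⟩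
      have hj4 : j < pvDirs.length := by
        simp only [List.length_cons, pvDirs] at hb ⊢; simp; omega
      have hdir : PySem.List.pyGet? pvDirs ((j : Nat) : Int) = some pvDirs[j] := by
        rw [PySem.List.pyGet?_natCast]; exact List.getElem?_eq_getElem hj4
      have hct : c ≠ t := by
        intro he; rw [← he, hc] at h1; exact Option.some_ne_none xy h1.2
      have hc₁ : (pos.insert t (xy.1 + pvDirs[j].1, xy.2 + pvDirs[j].2)).get? c = some xy := by
        rw [PySem.Dict.get?_insert_of_ne _ _ hct]; exact hc
      have hq₁ : ∀ u, ((pos.insert t (xy.1 + pvDirs[j].1, xy.2 + pvDirs[j].2)).get? u).isSome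
          = PySem.Set.contains (PySem.Set.add placed t) u := by
        intro u
        by_cases hu : u = t
        · subst hu
          rw [PySem.Dict.get?_insert_self, pvContains_add_self]
          rfl
        · rw [PySem.Dict.get?_insert_of_ne _ _ hu, pvContains_add_of_ne _ _ _ hu, hq u]
      have hplace : pvPlace pos (c, ((j : Nat) : Int), t)
          = pos.insert t (xy.1 + pvDirs[j].1, xy.2 + pvDirs[j].2) := by
        simp only [pvPlace, hdir, hc]
        rfl
      by_cases h2 : adj.contains t = true ∧ ¬ PySem.Set.contains enq t = true
      · simp only [pvInnerA, pvStepB, if_pos h1, if_pos h1b, hdir, if_pos h2]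
        obtain ⟨e1, e2, e3, e4, e5⟩ :=
          ih (j + 1) (pos.insert t (xy.1 + pvDirs[j].1, xy.2 + pvDirs[j].2))
            (PySem.Set.add placed t) (PySem.Set.add enq t) hb₁ hq₁ hc₁
        rw [pvInnerA_acc adj xy _ _ _ ([] ++ [t]),
            pvStepB_acc adj c _ _ _ ([] ++ [t]) ([] ++ [(c, ((j : Nat) : Int), t)])]
        refine ⟨?_, e2, by simp only [List.nil_append]; rw [e3], e4, e5⟩
        simp only [List.nil_append, List.singleton_append, List.foldl_cons]
        rw [hplace]
        exact e1
      · simp only [pvInnerA, pvStepB, if_pos h1, if_pos h1b, hdir, if_neg h2]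
        obtain ⟨e1, e2, e3, e4, e5⟩ :=
          ih (j + 1) (pos.insert t (xy.1 + pvDirs[j].1, xy.2 + pvDirs[j].2))
            (PySem.Set.add placed t) enq hb₁ hq₁ hc₁
        rw [pvStepB_acc adj c _ _ _ [] ([] ++ [(c, ((j : Nat) : Int), t)])]
        refine ⟨?_, e2, by simp only [List.nil_append]; rw [e3], e4, e5⟩
        simp only [List.nil_append, List.singleton_append, List.foldl_cons]
        rw [hplace]
        exact e1
    · -- skipped on both sides
      have h1b : ¬ (t ≠ "" ∧ ¬ PySem.Set.contains placed t = true) := by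
        intro hcon
        apply h1
        refine ⟨hcon.1, ?_⟩
        have h := hq t
        have : PySem.Set.contains placed t = false := by
          cases hh : PySem.Set.contains placed t
          · rfl
          · exact absurd hh hcon.2
        rw [this] at h
        exact Option.not_isSome_iff_eq_none.mp (by rw [h]; simp)
      simp only [pvInnerA, pvStepB, if_neg h1, if_neg h1b]
      exact ih (j + 1) pos placed enq hb₁ hq hc

-- MAIN SIMULATION: A's queue loop equals B's discovery followed by the coordinate fold
theorem pvMainSim (adj : PySem.Dict String (List String))
    (hlen : ∀ s conns, adj.get? s = some conns → conns.length ≤ 4) :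
    ∀ (fuel : Nat) (order : List String) (i : Nat) (pos : PySem.Dict String (Int × Int))
      (placed : PySem.Set String) (enq : PySem.Set String),
      (∀ t, (pos.get? t).isSome = PySem.Set.contains placed t) →
      (∀ u ∈ order, PySem.Set.contains placed u = true) →
      pvLoopA adj fuel (order.drop i) pos enq
        = (pvDiscover adj fuel order i placed enq []).foldl pvPlace pos := by
  intro fuel
  induction fuel with
  | zero =>
    intro order i pos placed enq hq hord
    cases h : order.drop i with
    | nil => simp [pvLoopA, pvDiscover]
    | cons a b => simp [pvLoopA, pvDiscover]
  | succ f ih =>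
    intro order i pos placed enq hq hord
    cases h : order[i]? with
    | none =>
      have hlen0 : order.length ≤ i := by
        by_contra hlt
        rw [List.getElem?_eq_getElem (by omega)] at h
        cases h
      rw [List.drop_eq_nil_of_le hlen0]
      simp [pvLoopA, pvDiscover, h]
    | some cur =>
      have hi : i < order.length := by
        by_contra hlt
        rw [List.getElem?_eq_none (by omega)] at h
        cases h
      have hcur : order[i] = cur := by
        rw [List.getElem?_eq_getElem hi] at h
        injection h
      have hdrop : order.drop i = cur :: order.drop (i + 1) := by
        rw [List.drop_eq_getElem_cons hi, hcur]
      have hcpl : PySem.Set.contains placed cur = true :=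
        hord cur (by rw [← hcur]; exact List.getElem_mem hi)
      rw [hdrop]
      show pvLoopA adj f (order.drop (i + 1) ++ (pvNodeA adj cur pos enq).2.2)
            (pvNodeA adj cur pos enq).1 (pvNodeA adj cur pos enq).2.1
          = (pvDiscover adj (f + 1) order i placed enq []).foldl pvPlace pos
      cases hget : adj.get? cur with
      | none =>
        have hgd : adj.getD cur [] = [] := by rw [PySem.Dict.getD_eq_get?_getD, hget]; rfl
        simp only [pvNodeA, hget]
        simp only [pvDiscover, h, hgd, PySem.List.enumerate_nil, List.foldl_nil]
        rw [List.append_nil]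
        exact ih order (i + 1) pos placed enq hq hord
      | some conns =>
        have hgd : adj.getD cur [] = conns := by
          rw [PySem.Dict.getD_eq_get?_getD, hget]; rfl
        obtain ⟨xy, hxy⟩ : ∃ xy, pos.get? cur = some xy :=
          Option.isSome_iff_exists.mp (by rw [hq cur]; exact hcpl)
        have hb4 : (0 : Nat) + conns.length ≤ 4 := by
          simpa using hlen cur conns hget
        obtain ⟨e1, e2, e3, e4, e5⟩ := pvInnerSim adj cur xy conns 0 pos placed enq hb4 hq hxy
        simp only [Nat.cast_zero] at e1 e2 e3 e4 e5
        have hmono : ∀ u, PySem.Set.contains placed u = true →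
            PySem.Set.contains ((PySem.List.enumerate conns).foldl (pvStepB adj cur)
              (placed, enq, [], [])).1 u = true := fun u hu =>
          pvStepB_placed_mono adj cur _ (placed, enq, [], []) u hu
        have hnewpl : ∀ u ∈ ((PySem.List.enumerate conns).foldl (pvStepB adj cur)
              (placed, enq, [], [])).2.2.1,
            PySem.Set.contains ((PySem.List.enumerate conns).foldl (pvStepB adj cur)
              (placed, enq, [], [])).1 u = true :=
          pvStepB_order_placed adj cur _ (placed, enq, [], []) (by intro u hu; cases hu)
        have hord' : ∀ u ∈ order ++ ((PySem.List.enumerate conns).foldl (pvStepB adj cur)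
              (placed, enq, [], [])).2.2.1,
            PySem.Set.contains ((PySem.List.enumerate conns).foldl (pvStepB adj cur)
              (placed, enq, [], [])).1 u = true := by
          intro u hu
          rcases List.mem_append.mp hu with hu | hu
          · exact hmono u (hord u hu)
          · exact hnewpl u hu
        have hih := ih (order ++ ((PySem.List.enumerate conns).foldl (pvStepB adj cur)
              (placed, enq, [], [])).2.2.1) (i + 1)
            ((PySem.List.enumerate conns).foldl (pvInnerA adj xy) (pos, enq, [])).1
            ((PySem.List.enumerate conns).foldl (pvStepB adj cur) (placed, enq, [], [])).1
            ((PySem.List.enumerate conns).foldl (pvStepB adj cur) (placed, enq, [], [])).2.1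
            e4 hord'
        rw [List.drop_append_of_le_length (by omega)] at hih
        -- left side: A's node step
        simp only [pvNodeA, hget, hxy, Option.getD_some]
        -- right side: unfold discovery one step and normalise the accumulators
        simp only [pvDiscover, h, hgd]
        rw [pvStepB_acc adj cur _ placed enq order []]
        simp only [List.nil_append]
        rw [pvDiscover_acc]
        rw [List.foldl_append]
        rw [e3, e2, ← e1]
        exact hih

-- values of Dict.ofList come from the input pairs (for transporting Pre_'s length bound)
theorem pvOfList_values (l : List (String × List String)) :
    ∀ (s : String) (v : List String),
      (PySem.Dict.ofList l).get? s = some v → v ∈ l.map (·.2) := by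
  have hfold : ∀ (l' : List (String × List String)) (d : PySem.Dict String (List String))
      (v : List String),
      v ∈ (l'.foldl (fun acc p => acc.insert p.1 p.2) d).values → v ∈ d.values ∨ v ∈ l'.map (·.2) := by
    intro l'
    induction l' with
    | nil => intro d v h; exact Or.inl h
    | cons p l' ih =>
      intro d v h
      rcases ih (d.insert p.1 p.2) v h with h' | h'
      · rcases PySem.Dict.mem_values_insert d p.1 p.2 v h' with h'' | h''
        · right; rw [h'']; exact List.mem_map_of_mem (List.mem_cons_self ..)
        · left; exact h''
      · right; exact List.mem_cons_of_mem _ h'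
  intro s v hget
  have hv : v ∈ (PySem.Dict.ofList l).values := by
    have hit := PySem.Dict.mem_items_of_get?_eq_some _ hget
    exact List.mem_map_of_mem hit
  rcases hfold l PySem.Dict.empty v hv with h | h
  · cases h
  · exact h

-- ===== VERDICT (by name: the statement is the Claim_ definition above) =====
theorem compute_module_positions_spec : Claim_equal_compute_module_positions := by
  intro l _ hpre
  unfold Spec_compute_module_positions compute_module_positions compute_module_positions_alt
  cases hk : (PySem.Dict.ofList l).keys with
  | nil => simp [hk]
  | cons m0 rest =>
    simp only [hk]
    have hlen : ∀ s conns, (PySem.Dict.ofList l).get? s = some conns → conns.length ≤ 4 := by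
      intro s conns hget
      rcases List.mem_map.mp (pvOfList_values l s conns hget) with ⟨p, hp, hpe⟩
      rw [← hpe]
      exact hpre p hp
    have hq0 : ∀ t, ((PySem.Dict.insert PySem.Dict.empty m0 ((0 : Int), (0 : Int))).get? t).isSome
        = PySem.Set.contains (PySem.Set.add PySem.Set.empty m0) t := by
      intro t
      by_cases ht : t = m0
      · subst ht; rw [PySem.Dict.get?_insert_self, pvContains_add_self]; rfl
      · rw [PySem.Dict.get?_insert_of_ne _ _ ht, pvContains_add_of_ne _ _ _ ht]; rfl
    have hord0 : ∀ u ∈ [m0], PySem.Set.contains (PySem.Set.add PySem.Set.empty m0) u = true := by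
      intro u hu
      rw [List.mem_singleton] at hu
      subst hu
      exact pvContains_add_self _ _
    have hmain := pvMainSim (PySem.Dict.ofList l) hlen (l.length + 1) [m0] 0
      (PySem.Dict.insert PySem.Dict.empty m0 ((0 : Int), (0 : Int)))
      (PySem.Set.add PySem.Set.empty m0) (PySem.Set.add PySem.Set.empty m0) hq0 hord0
    rw [List.drop_zero] at hmain
    rw [hmain]
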